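-- pv_equiv track=rewrite | github.com/ettore-galli/micropython-adc-module | adc_module/fft.py | arrange_samples
-- ===== SOURCE A (Python) =====
-- def arrange_samples(samples: list[float]) -> list[float]:
--     size: int = len(samples)
--     arranged: list[float] = samples
--     while size > 1:
--         arranged_buffer: list[float] = []
--         for start in range(0, len(samples), size):
--             buffer: list[float] = arranged[start : start + size]
--             buffer = buffer[0 : len(buffer) : 2] + buffer[1 : len(buffer) : 2]
--             arranged_buffer += buffer
--         arranged = arranged_buffer
--         size = size >> 1
--
--     return arranged
-- ===== SOURCE B (Python) =====
-- def arrange_samples(samples: list[float]) -> list[float]: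
--     # Gather formulation: compute, for each output position j, the source index
--     # directly by running the inverse even/odd-split index map through the stage
--     # sizes in reverse; no intermediate lists are built.
--     n = len(samples)
--     sizes = []
--     s = n
--     while s > 1:
--         sizes.append(s)
--         s >>= 1
--
--     def src(j: int) -> int:
--         for s in reversed(sizes):
--             b, q = divmod(j, s)
--             half = (min(s, n - b * s) + 1) // 2
--             j = b * s + (2 * q if q < half else 2 * (q - half) + 1)
--         return j
--
--     return [samples[src(j)] for j in range(n)]
-- ===== Notes on version B (the rewrite author's own statement) =====
-- stated objective: alternative
-- what changed: A repeatedly rebuilds the whole list log n times by slicing each block into evens+odds and concatenating buffers; B never builds intermediate lists: it computes, for each output position, its source index directly by composing the inverse even/odd index maps over the stage sizes, then gathers the output in one pass.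
import Mathlib
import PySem

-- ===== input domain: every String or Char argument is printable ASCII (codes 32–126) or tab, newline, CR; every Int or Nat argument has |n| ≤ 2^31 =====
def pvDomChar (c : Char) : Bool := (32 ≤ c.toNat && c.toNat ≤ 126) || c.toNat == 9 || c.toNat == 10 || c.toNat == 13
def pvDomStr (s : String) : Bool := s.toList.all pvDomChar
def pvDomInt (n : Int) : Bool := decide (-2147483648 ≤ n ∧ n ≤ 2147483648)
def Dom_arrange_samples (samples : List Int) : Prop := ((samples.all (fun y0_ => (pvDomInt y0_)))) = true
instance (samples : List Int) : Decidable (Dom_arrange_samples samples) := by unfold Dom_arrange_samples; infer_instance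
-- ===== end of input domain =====

-- B replaces A's log n rebuild-the-list passes by a direct gather: each output
-- position's source index is computed by composing the inverse even/odd index
-- maps over the stage sizes (objective: alternative formulation, similar cost).


-- ===== PORT A =====
-- buffer = buffer[0:len(buffer):2] + buffer[1:len(buffer):2]
-- (slice? is `some` here because the literal step 2 is non-zero)
def evenOddOf (buffer : List Int) : List Int :=
  ((PySem.List.slice? buffer (some 0) (some (buffer.length : Int)) 2).getD []) ++
  ((PySem.List.slice? buffer (some 1) (some (buffer.length : Int)) 2).getD [])

-- the body of A's while loop: one pass of block-wise even/odd splitting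
def pyStage (samples arranged : List Int) (size : Int) : List Int :=
  (PySem.List.pyRange 0 (samples.length : Int) size).foldl
    (fun acc start =>
      acc ++ evenOddOf (PySem.List.slice arranged (some start) (some (start + size)))) []

-- A's while loop; size (= len(samples), then halved) is a nonnegative Python int
def pyWhile (samples arranged : List Int) (size : Nat) : List Int :=
  if 1 < size then pyWhile samples (pyStage samples arranged (size : Int)) (size >>> 1)
  else arranged
termination_by size
decreasing_by simp only [Nat.shiftRight_one]; omega

def arrange_samples (samples : List Int) : List Int :=
  pyWhile samples samples samples.length

-- ===== PORT B =====
-- sizes = []; s = n; while s > 1: sizes.append(s); s >>= 1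
def sizesLoop (acc : List Int) (s : Nat) : List Int :=
  if 1 < s then sizesLoop (acc ++ [(s : Int)]) (s >>> 1) else acc
termination_by s
decreasing_by simp only [Nat.shiftRight_one]; omega

-- one step of src's for-loop: b, q = divmod(j, s); half = (min(s, n-b*s)+1)//2; …
def srcStep (n j s : Int) : Int :=
  let b := PySem.Int.floordiv j s
  let q := PySem.Int.mod j s
  let half := PySem.Int.floordiv (min s (n - b * s) + 1) 2
  b * s + (if q < half then 2 * q else 2 * (q - half) + 1)

-- def src(j): for s in reversed(sizes): … ; return j
def srcIdx (n : Int) (sizes : List Int) (j : Int) : Int :=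
  sizes.reverse.foldl (srcStep n) j

def arrange_samples_alt (samples : List Int) : List Int :=
  let n : Int := samples.length
  let sizes := sizesLoop [] samples.length
  -- samples[src(j)]: src(j) is provably in range, so Python's indexing never raises
  (PySem.List.pyRange 0 n 1).map (fun j => PySem.List.pyGetD samples (srcIdx n sizes j) 0)

-- ===== PRECONDITION & SPEC =====
def Spec_arrange_samples (samples : List Int) (out : List Int) : Prop := out = arrange_samples_alt samples
instance (samples : List Int) (out : List Int) : Decidable (Spec_arrange_samples samples out) := by unfold Spec_arrange_samples; infer_instance

-- ===== CLAIM (what is proved, stated in full; the proofs are below) =====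
def Claim_equal_arrange_samples : Prop := ∀ (samples : List Int), Dom_arrange_samples samples → Spec_arrange_samples samples (arrange_samples samples)

-- ===== LEMMAS AND PROOFS =====

-- Nat-level version of one inverse even/odd index step (what srcStep computes)
def gN (n s j : Nat) : Nat :=
  j / s * s + (if j % s < (min s (n - j / s * s) + 1) / 2 then 2 * (j % s)
               else 2 * (j % s - (min s (n - j / s * s) + 1) / 2) + 1)

-- Nat-level composed source-index map of the whole while loop
def chainN (n size j : Nat) : Nat :=
  if 1 < size then gN n size (chainN n (size >>> 1) j) else j
termination_by size
decreasing_by simp only [Nat.shiftRight_one]; omega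

-- pure (cons-shaped) version of sizesLoop
def sizesPure (s : Nat) : List Int :=
  if 1 < s then (s : Int) :: sizesPure (s >>> 1) else []
termination_by s
decreasing_by simp only [Nat.shiftRight_one]; omega

lemma gN_lt {n s j : Nat} (hs : 2 ≤ s) (hj : j < n) : gN n s j < n := by
  unfold gN
  have h1 := Nat.div_add_mod' j s
  have h2 := Nat.mod_lt j (show 0 < s by omega)
  generalize j / s = b at *
  generalize j % s = q at *
  split_ifs with h <;> omega

lemma chainN_lt {n j : Nat} (s : Nat) (hj : j < n) : chainN n s j < n := by
  induction s using Nat.strong_induction_on with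
  | _ s ih =>
    rw [chainN]
    split
    · exact gN_lt ‹1 < s› (ih (s >>> 1) (by simp only [Nat.shiftRight_one]; omega))
    · exact hj

lemma map_getD_range_self (m : List Int) :
    (List.range m.length).map (fun j => m.getD j 0) = m := by
  apply List.ext_getElem
  · simp
  · intro i h1 h2
    simp [List.getD_eq_getElem?_getD, List.getElem?_eq_getElem h2]

-- buffer[0:len(buffer):2] as a map over even indices
lemma slice2_evens (xs : List Int) :
    (PySem.List.slice? xs (some 0) (some (xs.length : Int)) 2).getD [] =
    (List.range ((xs.length + 1) / 2)).map (fun k => xs.getD (2 * k) 0) := by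
  simp only [PySem.List.slice?, PySem.List.sliceIndices]
  norm_num
  have hlen : ¬ ((xs.length : Int) < 0) := by omega
  simp only [if_neg hlen]
  have hcount : (if (0:Int) < (xs.length:Int) then (((xs.length:Int) + 2 - 1)/2).toNat else 0)
      = (xs.length + 1)/2 := by split_ifs <;> omega
  rw [hcount]
  rw [List.filterMap_congr (g := fun k => some (xs[2*k]?.getD 0)) ?_]
  · rw [show (fun k => some (xs[2*k]?.getD 0)) = some ∘ (fun k => xs[2*k]?.getD 0) from rfl,
      List.filterMap_eq_map]
  · intro k hk
    simp only [List.mem_range] at hk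
    have h2k : 2*k < xs.length := by omega
    have ht : ((2:ℤ) * (k:ℤ)).toNat = 2*k := by omega
    rw [ht, List.getElem?_eq_getElem h2k]
    simp [List.getElem?_eq_getElem h2k]

-- buffer[1:len(buffer):2] as a map over odd indices
lemma slice2_odds (xs : List Int) :
    (PySem.List.slice? xs (some 1) (some (xs.length : Int)) 2).getD [] =
    (List.range (xs.length / 2)).map (fun k => xs.getD (2 * k + 1) 0) := by
  simp only [PySem.List.slice?, PySem.List.sliceIndices]
  norm_num
  have hlen : ¬ ((xs.length : Int) < 0) := by omega
  simp only [if_neg hlen]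
  have hcount : (if ((1:Int) < (xs.length:Int) ∨ (xs.length:Int) < (xs.length:Int))
      then (((xs.length:Int) - min 1 (xs.length:Int) + 2 - 1)/2).toNat else 0)
      = xs.length / 2 := by split_ifs <;> omega
  rw [hcount]
  rw [List.filterMap_congr (g := fun k => some (xs[2*k+1]?.getD 0)) ?_]
  · rw [show (fun k => some (xs[2*k+1]?.getD 0)) = some ∘ (fun k => xs[2*k+1]?.getD 0) from rfl,
      List.filterMap_eq_map]
  · intro k hk
    simp only [List.mem_range] at hk
    have h2k : 2*k+1 < xs.length := by omega
    have ht : (min 1 (xs.length:Int) + 2 * (k:ℤ)).toNat = 2*k+1 := by omega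
    rw [ht, List.getElem?_eq_getElem h2k]
    simp [List.getElem?_eq_getElem h2k]

-- the even/odd split of one buffer, as a gather over its index range
lemma evenOddOf_eq (c : List Int) :
    evenOddOf c = (List.range c.length).map
      (fun q => c.getD (if q < (c.length + 1) / 2 then 2 * q
                        else 2 * (q - (c.length + 1) / 2) + 1) 0) := by
  rw [evenOddOf, slice2_evens, slice2_odds]
  have hsplit : c.length = (c.length + 1) / 2 + c.length / 2 := by omega
  conv_rhs => rw [hsplit, List.range_add, List.map_append, List.map_map]
  refine congrArg₂ _ (List.map_congr_left ?_) (List.map_congr_left ?_)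
  · intro k hk
    simp only [List.mem_range] at hk
    rw [if_pos (by omega)]
  · intro k _
    simp only [Function.comp]
    rw [if_neg (by omega)]
    congr 1
    omega

-- peel the first block start (0) off range(0, N, s)
lemma pyRange_step_head {N s : Nat} (hN : 0 < N) (hs : 0 < s) :
    PySem.List.pyRange 0 (N : Int) (s : Int) =
      (0 : Int) :: (PySem.List.pyRange 0 ((N - s : Nat) : Int) (s : Int)).map (· + (s : Int)) := by
  simp only [PySem.List.pyRange]
  have hs0 : ¬ ((s:Int) = 0) := by omega
  have hs1 : (0:Int) < (s:Int) := by omega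
  simp only [if_neg hs0, if_pos hs1]
  have key : ∀ (M : Nat), 0 < M → (((M:Int) - 0 + ↑s - 1) / ↑s).toNat = (M - 1)/s + 1 := by
    intro M hM
    have h1 : ((M:Int) - 0 + ↑s - 1) = ((M - 1 + s : Nat) : Int) := by push_cast; omega
    rw [h1, ← Int.natCast_div, Int.toNat_natCast, Nat.add_div_right _ hs]
  rw [if_pos (show (0:Int) < (N:Int) by omega), key N hN]
  by_cases hNs : N ≤ s
  · have h0 : (N - s : Nat) = 0 := by omega
    rw [h0]
    have h1 : (N-1)/s = 0 := Nat.div_eq_of_lt (by omega)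
    simp [h1]
  · rw [if_pos (show (0:Int) < ((N - s : Nat):Int) by omega), key (N - s) (by omega)]
    rw [show N - 1 = (N - s - 1) + s from by omega, Nat.add_div_right _ hs]
    conv_lhs => rw [List.range_succ_eq_map, List.map_cons, List.map_map]
    rw [List.map_map]
    refine congrArg₂ _ (by norm_num) (List.map_congr_left ?_)
    intro k _
    simp only [Function.comp, Nat.succ_eq_add_one]
    push_cast
    ring

-- shifting one block size commutes with gN
lemma gN_shift {n s j : Nat} (hs : 1 ≤ s) :
    gN n s (s + j) = s + gN (n - s) s j := by
  simp only [gN]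
  rw [Nat.add_comm s j, Nat.add_div_right j hs, Nat.add_mod_right j s]
  have h2 := Nat.mod_lt j (show 0 < s by omega)
  rw [Nat.succ_mul]
  generalize j / s * s = t
  generalize j % s = q at *
  split_ifs with h1 h2' h2' <;> omega

-- one stage of A (in flatMap form) is a gather along gN
lemma stage_gather (N : Nat) : ∀ (m : List Int) (s : Nat), m.length = N → 2 ≤ s →
    ((PySem.List.pyRange 0 (N : Int) (s : Int)).flatMap
        (fun start => evenOddOf (PySem.List.slice m (some start) (some (start + (s : Int)))))) =
      (List.range N).map (fun j => m.getD (gN N s j) 0) := by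
  induction N using Nat.strong_induction_on with
  | _ N ih =>
    intro m s hm hs
    by_cases hN : N = 0
    · subst hN
      norm_num [PySem.List.pyRange]
    · rw [pyRange_step_head (by omega) (by omega), List.flatMap_cons, List.flatMap_map]
      have hhead : PySem.List.slice m (some 0) (some (0 + (s:Int))) = m.take s := by
        rw [zero_add, PySem.List.slice_zero_start, PySem.List.slice_to_natCast]
      have htail : ∀ start ∈ PySem.List.pyRange 0 ((N - s : Nat) : Int) (s : Int),
          evenOddOf (PySem.List.slice m (some (start + ↑s)) (some (start + ↑s + ↑s))) =
          evenOddOf (PySem.List.slice (m.drop s) (some start) (some (start + ↑s))) := by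
        intro start hmem
        have h0 : 0 ≤ start :=
          ((PySem.List.mem_pyRange_iff_of_pos (by omega) start).mp hmem).1
        rw [PySem.List.slice_toNat m (by omega) (by omega),
          PySem.List.slice_toNat (m.drop s) (by omega) (by omega), List.drop_drop]
        have e1 : (start + (s:Int) + (s:Int)).toNat - (start + (s:Int)).toNat
            = (start + (s:Int)).toNat - start.toNat := by omega
        have e2 : (start + (s:Int)).toNat = start.toNat + s := by omega
        rw [e1, e2, Nat.add_comm start.toNat s]
      rw [List.flatMap_congr htail]
      rw [ih (N - s) (by omega) (m.drop s) s (by simp [hm]) hs]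
      rw [hhead, evenOddOf_eq]
      have hlen : (m.take s).length = min s N := by simp [hm]
      have hrange : List.range N
          = List.range (min s N) ++ (List.range (N - s)).map (fun j => min s N + j) := by
        rw [← List.range_add]
        congr 1
        omega
      rw [hrange, List.map_append, List.map_map, hlen]
      refine congrArg₂ _ (List.map_congr_left ?_) (List.map_congr_left ?_)
      · intro q hq
        simp only [List.mem_range] at hq
        have hb : q / s = 0 := Nat.div_eq_of_lt (by omega)
        have hq' : q % s = q := Nat.mod_eq_of_lt (by omega)
        have hgN : gN N s q
            = if q < (min s N + 1) / 2 then 2 * q else 2 * (q - (min s N + 1) / 2) + 1 := by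
          simp only [gN, hb, hq']
          norm_num
        rw [hgN]
        have hidx : (if q < (min s N + 1) / 2 then 2 * q else 2 * (q - (min s N + 1) / 2) + 1)
            < min s N := by split_ifs <;> omega
        simp only [List.getD_eq_getElem?_getD]
        rw [List.getElem?_take_of_lt (by omega)]
      · intro j hj
        simp only [List.mem_range] at hj
        have hsN : min s N = s := by omega
        simp only [Function.comp, hsN]
        rw [gN_shift (by omega)]
        simp only [List.getD_eq_getElem?_getD]
        rw [List.getElem?_drop]

-- the fold in pyStage, in flatMap form
lemma pyStage_eq (samples arranged : List Int) (s : Int) :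
    pyStage samples arranged s =
      (PySem.List.pyRange 0 (samples.length : Int) s).flatMap
        (fun start => evenOddOf (PySem.List.slice arranged (some start) (some (start + s)))) := by
  rw [pyStage, PySem.List.foldl_append_eq_flatMap, List.nil_append]

-- A's whole while loop is a gather along chainN
lemma while_gather (samples : List Int) : ∀ (size : Nat) (m : List Int),
    m.length = samples.length →
    pyWhile samples m size =
      (List.range samples.length).map (fun j => m.getD (chainN samples.length size j) 0) := by
  intro size
  induction size using Nat.strong_induction_on with
  | _ size ih =>
    intro m hm
    by_cases h : 1 < size
    · rw [pyWhile, if_pos h]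
      have hstage : pyStage samples m (size : Int)
          = (List.range samples.length).map (fun j => m.getD (gN samples.length size j) 0) := by
        rw [pyStage_eq]
        exact stage_gather samples.length m size hm (by omega)
      rw [hstage]
      rw [ih (size >>> 1) (by simp only [Nat.shiftRight_one]; omega) _ (by simp)]
      apply List.map_congr_left
      intro j hj
      simp only [List.mem_range] at hj
      rw [PySem.List.getD_map_range _ _ _ _ (chainN_lt _ hj)]
      conv_rhs => rw [chainN]
      rw [if_pos h]
    · rw [pyWhile, if_neg h]
      have hc : ∀ j, chainN samples.length size j = j := by
        intro j; rw [chainN, if_neg h]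
      simp only [hc]
      rw [← hm, map_getD_range_self]

-- srcStep computes gN on in-range Nat inputs
lemma srcStep_eq_gN {n s j : Nat} (hs : 2 ≤ s) (hj : j < n) :
    srcStep (n : Int) (j : Int) (s : Int) = (gN n s j : Int) := by
  simp only [srcStep, gN]
  rw [PySem.Int.floordiv_natCast j s, PySem.Int.mod_natCast j s]
  have hprod : ((j/s : Nat) : Int) * (s:Int) = ((j/s*s : Nat) : Int) := by push_cast; ring
  rw [hprod]
  have hbs : j / s * s ≤ j := Nat.div_mul_le_self j s
  have hmod : j % s < s := Nat.mod_lt j (by omega)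
  generalize j / s * s = t at *
  generalize j % s = q at *
  have hmin : (min ((s:Nat):Int) ((n:Int) - ((t:Nat):Int))) = ((min s (n - t) : Nat) : Int) := by
    omega
  rw [hmin]
  have hfd : PySem.Int.floordiv (((min s (n - t) : Nat) : Int) + 1) 2
      = (((min s (n - t) + 1) / 2 : Nat) : Int) := by
    rw [show (((min s (n-t) : Nat) : Int) + 1) = (((min s (n-t) + 1 : Nat)) : Int) from by push_cast; ring]
    exact_mod_cast PySem.Int.floordiv_natCast (min s (n-t) + 1) 2
  rw [hfd]
  by_cases h : q < (min s (n - t) + 1)/2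
  · rw [if_pos (by exact_mod_cast h), if_pos h]
    omega
  · rw [if_neg (by exact_mod_cast h), if_neg h]
    omega

lemma sizesLoop_eq (s : Nat) : ∀ acc, sizesLoop acc s = acc ++ sizesPure s := by
  induction s using Nat.strong_induction_on with
  | _ s ih =>
    intro acc
    rw [sizesLoop, sizesPure]
    split_ifs with h
    · rw [ih (s >>> 1) (by simp only [Nat.shiftRight_one]; omega)]
      simp
    · simp

-- B's src(j) computes chainN
lemma srcIdx_eq_chain (n : Nat) : ∀ (s : Nat) (j : Nat), j < n →
    srcIdx (n : Int) (sizesLoop [] s) (j : Int) = (chainN n s j : Int) := by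
  intro s
  induction s using Nat.strong_induction_on with
  | _ s ih =>
    intro j hj
    rw [sizesLoop_eq, List.nil_append, srcIdx, sizesPure]
    split_ifs with h
    · rw [List.reverse_cons, List.foldl_append]
      have hin : (sizesPure (s >>> 1)).reverse.foldl (srcStep ↑n) ↑j
          = ((chainN n (s >>> 1) j : Nat) : Int) := by
        rw [show (sizesPure (s >>> 1)).reverse.foldl (srcStep (n:Int)) (j:Int)
              = srcIdx (n:Int) (sizesLoop [] (s >>> 1)) (j:Int) from by
            rw [srcIdx, sizesLoop_eq, List.nil_append]]
        exact ih (s >>> 1) (by simp only [Nat.shiftRight_one]; omega) j hj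
      rw [hin, List.foldl_cons, List.foldl_nil]
      rw [srcStep_eq_gN (by omega) (chainN_lt _ hj)]
      conv_rhs => rw [chainN]
      rw [if_pos h]
    · rw [List.reverse_nil, List.foldl_nil]
      conv_rhs => rw [chainN]
      rw [if_neg h]

-- ===== VERDICT (by name: the statement is the Claim_ definition above) =====
theorem arrange_samples_spec : Claim_equal_arrange_samples := by
  intro samples _
  unfold Spec_arrange_samples arrange_samples
  simp only [arrange_samples_alt]
  rw [while_gather samples samples.length samples rfl]
  rw [PySem.List.pyRange_zero_natCast, List.map_map]
  apply List.map_congr_left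
  intro k hk
  simp only [List.mem_range] at hk
  simp only [Function.comp]
  rw [srcIdx_eq_chain samples.length samples.length k hk, PySem.List.pyGetD_natCast]
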